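-- pv_equiv track=rewrite | github.com/Zui0per/bachelorThesisPrograms | Prgramme/ENV_1_AutoSklearn_Model_creation/sampling/model-creation/create_model_type_plot.py | get_groups_from_all_sorted_keys
-- ===== SOURCE A (Python) =====
-- def get_custom_name(name: str):
--     if ("10emukit-with-model-variance" in name):
--         return "Emukit Model-Varianz 10%"
--     if ("10lhs-center" in name):
--         return "LHS-center 10%"
--     if ("10lhs-maximin" in name):
--         return "LHS-maximin 10%"
--     if ("5emukit-with-model-variance" in name):
--         return "Emukit Model-Varianz 5%"
--     if ("5lhs-center" in name):
--         return "LHS-center 5%"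
--     if ("5lhs-maximin" in name):
--         return "LHS-maximin 5%"
--     if ("2emukit-with-model-variance" in name):
--         return "Emukit Model-Varianz 2%"
--     if ("2lhs-center" in name):
--         return "LHS-center 2%"
--     if ("2lhs-maximin" in name):
--         return "LHS-maximin 2%"
--     if ("emukit-with-model-variance" in name or "emukit-Model-Varianz" in name):
--         return "Emukit Model-Varianz"
--     if ("emukit_with_ivr" in name or "emukit-IVR" in name):
--         return "Emukit IVR"
--     if ("2-level-full" in name or "two-level-full-factorial" in name):
--         return "2-Stufen FFD"
--     if ("box-behnken" in name):
--         return "Box-Behnken Design"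
--     if ("central-composite_c" in name):
--         return "CCD-C"
--     if ("central-composite_f" in name):
--         return "CCD-F"
--     if ("central-composite_i" in name):
--         return "CCD-I"
--     if ("placket-burman" in name):
--         return "Plackett Burman Design"
--     if ("CVT" in name):
--         return "CVT"
--     if ("lhs-centermaximin" in name):
--         return "LHS-centermaximin"
--     if ("lhs-center" in name):
--         return "LHS-center"
--     if ("lhs-correlation" in name):
--         return "LHS-correlation"
--     if ("lhs-maximin" in name):
--         return "LHS-maximin"
--
--     return name
--
-- def get_groups_from_all_sorted_keys(sorted_keys):
--     groups = []
--     group = []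
--     for index in range(len(sorted_keys)):
--
--         group.append(sorted_keys[index])
--
--         if index + 1 < len(sorted_keys) and get_custom_name(sorted_keys[index + 1]) is not get_custom_name(sorted_keys[index]):
--             groups.append(group)
--             group = []
--
--     groups.append(group)
--     return groups
-- ===== SOURCE B (Python) =====
-- def get_custom_name(name: str):
--     if ("10emukit-with-model-variance" in name):
--         return "Emukit Model-Varianz 10%"
--     if ("10lhs-center" in name):
--         return "LHS-center 10%"
--     if ("10lhs-maximin" in name):
--         return "LHS-maximin 10%"
--     if ("5emukit-with-model-variance" in name):
--         return "Emukit Model-Varianz 5%"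
--     if ("5lhs-center" in name):
--         return "LHS-center 5%"
--     if ("5lhs-maximin" in name):
--         return "LHS-maximin 5%"
--     if ("2emukit-with-model-variance" in name):
--         return "Emukit Model-Varianz 2%"
--     if ("2lhs-center" in name):
--         return "LHS-center 2%"
--     if ("2lhs-maximin" in name):
--         return "LHS-maximin 2%"
--     if ("emukit-with-model-variance" in name or "emukit-Model-Varianz" in name):
--         return "Emukit Model-Varianz"
--     if ("emukit_with_ivr" in name or "emukit-IVR" in name):
--         return "Emukit IVR"
--     if ("2-level-full" in name or "two-level-full-factorial" in name):
--         return "2-Stufen FFD"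
--     if ("box-behnken" in name):
--         return "Box-Behnken Design"
--     if ("central-composite_c" in name):
--         return "CCD-C"
--     if ("central-composite_f" in name):
--         return "CCD-F"
--     if ("central-composite_i" in name):
--         return "CCD-I"
--     if ("placket-burman" in name):
--         return "Plackett Burman Design"
--     if ("CVT" in name):
--         return "CVT"
--     if ("lhs-centermaximin" in name):
--         return "LHS-centermaximin"
--     if ("lhs-center" in name):
--         return "LHS-center"
--     if ("lhs-correlation" in name):
--         return "LHS-correlation"
--     if ("lhs-maximin" in name):
--         return "LHS-maximin"
--
--     return name
--
--
-- def get_groups_from_all_sorted_keys(sorted_keys):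
--     # index-table-then-slice decomposition: compute all group boundaries first,
--     # then cut the list along them.
--     names = [get_custom_name(k) for k in sorted_keys]
--     n = len(sorted_keys)
--     bounds = [0] + [i for i in range(1, n) if names[i] != names[i - 1]] + [n]
--     return [sorted_keys[a:b] for a, b in zip(bounds, bounds[1:])]
-- ===== Notes on version B (the rewrite author's own statement) =====
-- stated objective: alternative
-- what changed: Replaces A's interleaved accumulate-and-flush scan by an index-table-then-slice decomposition (map to custom names, collect boundary indices, slice between consecutive boundaries), comparing names by value where A compares by object identity ('is not').
-- outside the precondition, e.g. on get_groups_from_all_sorted_keys(['0x10', '0x10']): A returns [['0x10'], ['0x10']], B returns [['0x10', '0x10']]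
import Mathlib
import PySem

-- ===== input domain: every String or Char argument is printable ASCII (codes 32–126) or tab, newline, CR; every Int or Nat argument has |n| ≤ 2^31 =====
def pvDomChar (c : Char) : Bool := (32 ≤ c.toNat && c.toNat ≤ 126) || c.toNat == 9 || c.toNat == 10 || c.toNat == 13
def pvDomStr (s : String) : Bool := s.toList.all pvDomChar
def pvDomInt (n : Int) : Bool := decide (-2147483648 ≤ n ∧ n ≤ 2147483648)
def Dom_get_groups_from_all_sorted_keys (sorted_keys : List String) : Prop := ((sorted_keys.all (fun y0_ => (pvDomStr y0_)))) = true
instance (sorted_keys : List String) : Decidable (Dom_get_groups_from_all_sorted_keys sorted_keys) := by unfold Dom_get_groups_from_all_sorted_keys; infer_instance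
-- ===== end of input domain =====

-- B replaces A's interleaved accumulate-and-flush scan by an index-table-then-slice
-- decomposition (same cost, different structure); equivalence of the RETURN value is
-- proved on Pre_, which excludes inputs where A's `is not` comparison depends on
-- CPython string interning.

-- ===== PORT A =====
def get_custom_name (name : String) : String :=
  if PySem.Str.isIn "10emukit-with-model-variance" name then "Emukit Model-Varianz 10%"
  else if PySem.Str.isIn "10lhs-center" name then "LHS-center 10%"
  else if PySem.Str.isIn "10lhs-maximin" name then "LHS-maximin 10%"
  else if PySem.Str.isIn "5emukit-with-model-variance" name then "Emukit Model-Varianz 5%"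
  else if PySem.Str.isIn "5lhs-center" name then "LHS-center 5%"
  else if PySem.Str.isIn "5lhs-maximin" name then "LHS-maximin 5%"
  else if PySem.Str.isIn "2emukit-with-model-variance" name then "Emukit Model-Varianz 2%"
  else if PySem.Str.isIn "2lhs-center" name then "LHS-center 2%"
  else if PySem.Str.isIn "2lhs-maximin" name then "LHS-maximin 2%"
  else if PySem.Str.isIn "emukit-with-model-variance" name || PySem.Str.isIn "emukit-Model-Varianz" name then "Emukit Model-Varianz"
  else if PySem.Str.isIn "emukit_with_ivr" name || PySem.Str.isIn "emukit-IVR" name then "Emukit IVR"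
  else if PySem.Str.isIn "2-level-full" name || PySem.Str.isIn "two-level-full-factorial" name then "2-Stufen FFD"
  else if PySem.Str.isIn "box-behnken" name then "Box-Behnken Design"
  else if PySem.Str.isIn "central-composite_c" name then "CCD-C"
  else if PySem.Str.isIn "central-composite_f" name then "CCD-F"
  else if PySem.Str.isIn "central-composite_i" name then "CCD-I"
  else if PySem.Str.isIn "placket-burman" name then "Plackett Burman Design"
  else if PySem.Str.isIn "CVT" name then "CVT"
  else if PySem.Str.isIn "lhs-centermaximin" name then "LHS-centermaximin"
  else if PySem.Str.isIn "lhs-center" name then "LHS-center"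
  else if PySem.Str.isIn "lhs-correlation" name then "LHS-correlation"
  else if PySem.Str.isIn "lhs-maximin" name then "LHS-maximin"
  else name

-- true iff get_custom_name returns one of its literal constants for this name (not the fallback)
def pv_matched (name : String) : Bool :=
  PySem.Str.isIn "10emukit-with-model-variance" name || PySem.Str.isIn "10lhs-center" name ||
  PySem.Str.isIn "10lhs-maximin" name || PySem.Str.isIn "5emukit-with-model-variance" name ||
  PySem.Str.isIn "5lhs-center" name || PySem.Str.isIn "5lhs-maximin" name ||
  PySem.Str.isIn "2emukit-with-model-variance" name || PySem.Str.isIn "2lhs-center" name ||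
  PySem.Str.isIn "2lhs-maximin" name || PySem.Str.isIn "emukit-with-model-variance" name ||
  PySem.Str.isIn "emukit-Model-Varianz" name || PySem.Str.isIn "emukit_with_ivr" name ||
  PySem.Str.isIn "emukit-IVR" name || PySem.Str.isIn "2-level-full" name ||
  PySem.Str.isIn "two-level-full-factorial" name || PySem.Str.isIn "box-behnken" name ||
  PySem.Str.isIn "central-composite_c" name || PySem.Str.isIn "central-composite_f" name ||
  PySem.Str.isIn "central-composite_i" name || PySem.Str.isIn "placket-burman" name ||
  PySem.Str.isIn "CVT" name || PySem.Str.isIn "lhs-centermaximin" name ||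
  PySem.Str.isIn "lhs-center" name || PySem.Str.isIn "lhs-correlation" name ||
  PySem.Str.isIn "lhs-maximin" name


-- Hand-port of Python's  `get_custom_name(a) is not get_custom_name(b)`  (object identity has
-- no PySem primitive): exact when both names hit a literal branch of get_custom_name (each
-- branch always returns the same interned constant, so identity = value equality there); when
-- the fallback branch is involved the Python result depends on object identity, which is not a
-- function of the string values — modeled here as "distinct objects". Pre_ below excludes
-- exactly the inputs on which this model could be inexact.
def pv_custom_isNot (a b : String) : Bool :=
  if pv_matched a && pv_matched b then get_custom_name a != get_custom_name b else true

def get_groups_from_all_sorted_keys (sorted_keys : List String) : List (List String) :=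
  let n : Int := sorted_keys.length
  let st := (PySem.List.pyRange 0 n 1).foldl
    (fun (st : List (List String) × List String) index =>
      let group := st.2 ++ [PySem.List.pyGetD sorted_keys index ""]
      if index + 1 < n ∧
         pv_custom_isNot (PySem.List.pyGetD sorted_keys (index + 1) "")
           (PySem.List.pyGetD sorted_keys index "") = true then
        (st.1 ++ [group], ([] : List String))
      else
        (st.1, group))
    ([], [])
  st.1 ++ [st.2]

-- ===== PORT B =====
def get_groups_from_all_sorted_keys_alt (sorted_keys : List String) : List (List String) :=
  let names := sorted_keys.map get_custom_name
  let n : Int := sorted_keys.length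
  let bounds : List Int :=
    [0] ++ (PySem.List.pyRange 1 n 1).filter
      (fun i => decide (PySem.List.pyGetD names i "" ≠ PySem.List.pyGetD names (i - 1) "")) ++ [n]
  (bounds.zip (bounds.drop 1)).map
    (fun ab => PySem.List.slice sorted_keys (some ab.1) (some ab.2))

-- ===== PRECONDITION & SPEC =====
-- Pre_ excludes lists in which some ADJACENT pair of keys has equal custom names with at
-- least one of the two produced by get_custom_name's identity fallback: there A's `is not`
-- comparison depends on CPython string interning (an accident of A's implementation, not a
-- function of the string values), so no value-level port can be claimed on those inputs.
def Pre_get_groups_from_all_sorted_keys (sorted_keys : List String) : Prop :=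
  ((sorted_keys.zip sorted_keys.tail).all
    (fun p => get_custom_name p.1 != get_custom_name p.2 || (pv_matched p.1 && pv_matched p.2))) = true
instance (sorted_keys : List String) : Decidable (Pre_get_groups_from_all_sorted_keys sorted_keys) := by
  unfold Pre_get_groups_from_all_sorted_keys; infer_instance

def pvWitness_get_groups_from_all_sorted_keys : List String :=
  ["a10lhs-center", "zz", "box-behnken-x"]

def Spec_get_groups_from_all_sorted_keys (sorted_keys : List String) (out : List (List String)) : Prop := out = get_groups_from_all_sorted_keys_alt sorted_keys
instance (sorted_keys : List String) (out : List (List String)) : Decidable (Spec_get_groups_from_all_sorted_keys sorted_keys out) := by unfold Spec_get_groups_from_all_sorted_keys; infer_instance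

-- ===== CLAIM (what is proved, stated in full; the proofs are below) =====
def Claim_equal_get_groups_from_all_sorted_keys : Prop := ∀ (sorted_keys : List String), Dom_get_groups_from_all_sorted_keys sorted_keys → Pre_get_groups_from_all_sorted_keys sorted_keys → Spec_get_groups_from_all_sorted_keys sorted_keys (get_groups_from_all_sorted_keys sorted_keys)

-- ===== LEMMAS AND PROOFS =====

-- the boundary test of port B, as a named predicate
def pvD (k : List String) (i : Int) : Bool :=
  decide (PySem.List.pyGetD (k.map get_custom_name) i "" ≠
          PySem.List.pyGetD (k.map get_custom_name) (i - 1) "")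

-- the boundary test of port A (identity-modeled), as a named predicate
def pvDA (k : List String) (i : Int) : Bool :=
  pv_custom_isNot (PySem.List.pyGetD k i "") (PySem.List.pyGetD k (i - 1) "")

-- boundaries found by A's scan after its first m iterations
def pvF (k : List String) (m : Nat) : List Int :=
  (PySem.List.pyRange 1 ((m : Int) + 1) 1).filter (pvDA k)

-- cut k along consecutive pairs of a boundary list
def pvSlices (k : List String) (bs : List Int) : List (List String) :=
  (bs.zip (bs.drop 1)).map (fun ab => PySem.List.slice k (some ab.1) (some ab.2))

-- A's loop body, named for the proofs (definitionally the lambda of port A)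
def pvStep (k : List String) (st : List (List String) × List String) (index : Int) :
    List (List String) × List String :=
  let group := st.2 ++ [PySem.List.pyGetD k index ""]
  if index + 1 < (k.length : Int) ∧
     pv_custom_isNot (PySem.List.pyGetD k (index + 1) "")
       (PySem.List.pyGetD k index "") = true then
    (st.1 ++ [group], ([] : List String))
  else
    (st.1, group)

lemma pvSlices_snoc (k : List String) (a x : Int) (bs : List Int) :
    pvSlices k ((a :: bs) ++ [x]) =
      pvSlices k (a :: bs) ++ [PySem.List.slice k (some ((a :: bs).getLast (by simp))) (some x)] := by
  induction bs generalizing a with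
  | nil => simp [pvSlices]
  | cons b bs ih =>
      have h := ih b
      simp only [pvSlices, List.cons_append, List.zip_cons_cons, List.drop_succ_cons,
        List.map_cons, List.drop] at *
      rw [List.getLast_cons (by simp)]
      simp [h]

lemma pv_slice_snoc (k : List String) (b : Int) (m : Nat)
    (hb0 : 0 ≤ b) (hbm : b ≤ (m : Int)) (hm : m < k.length) :
    PySem.List.slice k (some b) (some (m : Int)) ++ [k[m]] =
      PySem.List.slice k (some b) (some ((m : Int) + 1)) := by
  have h1 : ((m : Int) + 1) = ((m + 1 : Nat) : Int) := by push_cast; ring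
  rw [h1, PySem.List.slice_toNat k hb0 (by positivity), PySem.List.slice_toNat k hb0 (by positivity)]
  have hb : b.toNat ≤ m := by omega
  have h2 : (((m + 1 : Nat) : Int)).toNat - b.toNat = (m - b.toNat) + 1 := by omega
  have h3 : ((m : Int)).toNat - b.toNat = m - b.toNat := by omega
  rw [h2, h3, List.take_add_one]
  have h4 : (k.drop b.toNat)[m - b.toNat]? = some k[m] := by
    rw [List.getElem?_drop]
    have h5 : b.toNat + (m - b.toNat) = m := by omega
    rw [h5, List.getElem?_eq_getElem hm]
  rw [h4]
  rfl

lemma pv_last_bounds (k : List String) (m : Nat) :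
    0 ≤ (0 :: pvF k m).getLast (by simp) ∧ (0 :: pvF k m).getLast (by simp) ≤ (m : Int) := by
  have hmem := List.getLast_mem (l := 0 :: pvF k m) (by simp)
  rcases List.mem_cons.mp hmem with h | h
  · omega
  · obtain ⟨⟨h1, h2⟩, -⟩ : (1 ≤ (0 :: pvF k m).getLast (by simp) ∧
        (0 :: pvF k m).getLast (by simp) < (m : Int) + 1) ∧
        pvDA k ((0 :: pvF k m).getLast (by simp)) = true := by simpa [pvF] using h
    omega

lemma pvDA_eq (k : List String) (m : Nat) :
    (pv_custom_isNot (PySem.List.pyGetD k ((m : Int) + 1) "")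
        (PySem.List.pyGetD k (m : Int) "") = true) ↔ pvDA k ((m : Int) + 1) = true := by
  unfold pvDA
  rw [show ((m : Int) + 1 - 1) = (m : Int) by ring]

lemma pvF_succ (k : List String) (m : Nat) :
    pvF k (m + 1) = pvF k m ++ (if pvDA k ((m : Int) + 1) then [(m : Int) + 1] else []) := by
  unfold pvF
  have h1 : ((m + 1 : Nat) : Int) + 1 = (((m : Int) + 1) + 1) := by push_cast; ring
  rw [h1, PySem.List.pyRange_one_succ_right (by omega), List.filter_append]
  cases hd : pvDA k ((m : Int) + 1) <;> simp [List.filter, hd]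

lemma pv_slice_self (k : List String) (x : Int) (hx : 0 ≤ x) :
    PySem.List.slice k (some x) (some x) = [] := by
  rw [PySem.List.slice_toNat k hx hx]
  simp

lemma pvInv (k : List String) (m : Nat) (hm : m + 1 ≤ k.length) :
    (PySem.List.pyRange 0 (m : Int) 1).foldl (pvStep k) ([], []) =
      (pvSlices k (0 :: pvF k m),
        PySem.List.slice k (some ((0 :: pvF k m).getLast (by simp))) (some (m : Int))) := by
  induction m with
  | zero =>
      rw [PySem.List.pyRange_one_eq_nil (by omega)]
      simp [pvF, pvSlices, PySem.List.pyRange_one_eq_nil, PySem.List.slice_to]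
  | succ m ih =>
      have hmN : m + 1 ≤ k.length := by omega
      have ihh := ih hmN
      have h1 : ((m + 1 : Nat) : Int) = (m : Int) + 1 := by push_cast; ring
      rw [h1, PySem.List.pyRange_one_succ_right (by omega), List.foldl_append, ihh]
      simp only [List.foldl_cons, List.foldl_nil]
      obtain ⟨hb0, hbm⟩ := pv_last_bounds k m
      have hmlt : m < k.length := by omega
      have hgroup :
          PySem.List.slice k (some ((0 :: pvF k m).getLast (by simp))) (some (m : Int)) ++
              [PySem.List.pyGetD k (m : Int) ""] =
            PySem.List.slice k (some ((0 :: pvF k m).getLast (by simp))) (some ((m : Int) + 1)) := by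
        rw [PySem.List.pyGetD_natCast, List.getD_eq_getElem _ _ hmlt]
        exact pv_slice_snoc k _ m hb0 hbm hmlt
      show pvStep k _ _ = _
      rw [pvStep]
      simp only [hgroup]
      have hcond1 : (m : Int) + 1 < (k.length : Int) := by omega
      by_cases hd : pvDA k ((m : Int) + 1) = true
      · rw [if_pos ⟨hcond1, (pvDA_eq k m).mpr hd⟩]
        rw [pvF_succ, if_pos hd]
        have hsnoc := pvSlices_snoc k 0 ((m : Int) + 1) (pvF k m)
        rw [Prod.mk.injEq]
        refine ⟨?_, ?_⟩
        · simp only [List.cons_append] at hsnoc ⊢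
          rw [hsnoc]
        · have hlast : ((0 :: (pvF k m ++ [(m : Int) + 1])).getLast (by simp)) = (m : Int) + 1 :=
            List.getLast_concat (l := 0 :: pvF k m)
          rw [hlast, pv_slice_self k _ (by omega)]
      · rw [if_neg (by
          intro hc
          exact hd ((pvDA_eq k m).mp hc.2))]
        rw [pvF_succ, if_neg hd]
        simp

-- under Pre_, A's identity-modeled boundary test agrees with B's value-level one
lemma pv_pre_pair (k : List String) (hPre : Pre_get_groups_from_all_sorted_keys k)
    (m : Nat) (hm : m + 1 < k.length) :
    pv_custom_isNot k[m + 1] k[m] = (get_custom_name k[m + 1] != get_custom_name k[m]) := by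
  have hmem : (k[m], k[m + 1]) ∈ k.zip k.tail := by
    have hg : (k.zip k.tail)[m]'(by simp [List.length_tail]; omega) = (k[m], k[m + 1]) := by
      simp [List.getElem_zip, List.getElem_tail]
    exact hg ▸ List.getElem_mem _
  have h := List.all_eq_true.mp hPre _ hmem
  simp only [Bool.or_eq_true, Bool.and_eq_true, bne_iff_ne] at h
  unfold pv_custom_isNot
  by_cases hmb : pv_matched k[m + 1] && pv_matched k[m]
  · rw [if_pos hmb]
  · rw [if_neg hmb]
    rcases h with h | ⟨h1, h2⟩
    · exact (bne_iff_ne.mpr (fun hc => h hc.symm)).symm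
    · exact absurd (by simp [h1, h2]) hmb

lemma pvD_getElem (k : List String) (m : Nat) (hm : m + 1 < k.length) :
    pvD k ((m : Int) + 1) = (get_custom_name k[m + 1] != get_custom_name k[m]) := by
  have h1 : ((m : Int) + 1) = ((m + 1 : Nat) : Int) := by push_cast; ring
  have h2 : ((m + 1 : Nat) : Int) - 1 = ((m : Nat) : Int) := by push_cast; ring
  rw [pvD, h1, h2]
  rw [PySem.List.pyGetD_natCast, PySem.List.pyGetD_natCast]
  rw [List.getD_eq_getElem _ _ (by simpa using hm), List.getD_eq_getElem _ _ (by simp; omega)]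
  rw [Bool.eq_iff_iff]
  simp [bne_iff_ne]

lemma pvDA_getElem (k : List String) (m : Nat) (hm : m + 1 < k.length) :
    pvDA k ((m : Int) + 1) = pv_custom_isNot k[m + 1] k[m] := by
  have h1 : ((m : Int) + 1) = ((m + 1 : Nat) : Int) := by push_cast; ring
  rw [pvDA, show ((m : Int) + 1 - 1) = ((m : Nat) : Int) by ring, h1]
  rw [PySem.List.pyGetD_natCast, PySem.List.pyGetD_natCast]
  rw [List.getD_eq_getElem _ _ hm, List.getD_eq_getElem _ _ (by omega)]

lemma pvF_bridge (k : List String) (hPre : Pre_get_groups_from_all_sorted_keys k)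
    (m : Nat) (hm : m + 1 ≤ k.length) :
    pvF k m = (PySem.List.pyRange 1 ((m : Int) + 1) 1).filter (pvD k) := by
  unfold pvF
  apply List.filter_congr
  intro i hi
  obtain ⟨hi1, hi2⟩ := PySem.List.mem_pyRange_one.mp hi
  obtain ⟨j, rfl⟩ : ∃ j : Nat, i = (j : Int) + 1 := ⟨(i - 1).toNat, by omega⟩
  have hj : j + 1 < k.length := by omega
  rw [pvDA_getElem k j hj, pvD_getElem k j hj, pv_pre_pair k hPre j hj]

-- ===== VERDICT (by name: the statement is the Claim_ definition above) =====
theorem get_groups_from_all_sorted_keys_spec : Claim_equal_get_groups_from_all_sorted_keys := by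
  intro k _ hPre
  unfold Spec_get_groups_from_all_sorted_keys
  have hA : get_groups_from_all_sorted_keys k =
      ((PySem.List.pyRange 0 (k.length : Int) 1).foldl (pvStep k) ([], [])).1 ++
        [((PySem.List.pyRange 0 (k.length : Int) 1).foldl (pvStep k) ([], [])).2] := rfl
  have hB : get_groups_from_all_sorted_keys_alt k =
      pvSlices k ((0 :: (PySem.List.pyRange 1 (k.length : Int) 1).filter (pvD k)) ++
        [(k.length : Int)]) := rfl
  rcases Nat.eq_zero_or_pos k.length with h0 | hpos
  · have hk : k = [] := List.length_eq_zero_iff.mp h0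
    subst hk; rfl
  · have hcast : ((k.length - 1 : Nat) : Int) + 1 = (k.length : Int) := by omega
    have hF : (PySem.List.pyRange 1 (k.length : Int) 1).filter (pvD k) = pvF k (k.length - 1) := by
      rw [pvF_bridge k hPre (k.length - 1) (by omega), hcast]
    have hinv := pvInv k (k.length - 1) (by omega)
    rw [hA, hB, hF]
    have hsplit : PySem.List.pyRange 0 (k.length : Int) 1 =
        PySem.List.pyRange 0 ((k.length - 1 : Nat) : Int) 1 ++ [((k.length - 1 : Nat) : Int)] := by
      rw [← hcast, PySem.List.pyRange_one_succ_right (by omega)]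
    rw [hsplit, List.foldl_append, hinv]
    simp only [List.foldl_cons, List.foldl_nil]
    obtain ⟨hb0, hbm⟩ := pv_last_bounds k (k.length - 1)
    have hmlt : k.length - 1 < k.length := by omega
    have hgroup :
        PySem.List.slice k (some ((0 :: pvF k (k.length - 1)).getLast (by simp)))
            (some ((k.length - 1 : Nat) : Int)) ++
            [PySem.List.pyGetD k ((k.length - 1 : Nat) : Int) ""] =
          PySem.List.slice k (some ((0 :: pvF k (k.length - 1)).getLast (by simp)))
            (some (k.length : Int)) := by
      rw [PySem.List.pyGetD_natCast, List.getD_eq_getElem _ _ hmlt, ← hcast]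
      exact pv_slice_snoc k _ (k.length - 1) hb0 hbm hmlt
    show (pvStep k _ _).1 ++ [(pvStep k _ _).2] = _
    rw [pvStep]
    rw [if_neg (by rintro ⟨hc, -⟩; omega)]
    simp only [hgroup]
    exact (pvSlices_snoc k 0 (k.length : Int) (pvF k (k.length - 1))).symm
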